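-- pv_equiv track=rewrite | github.com/goodrain/rainbond-console | marketapi/services.py | compute_group_service_status
-- ===== SOURCE A (Python) =====
-- def compute_group_service_status(services_status):
--     if not services_status:
--         return 'unknow'
--
--     running_count = 0
--     closed_count = 0
--     starting_count = 0
--     undeploy_count = 0
--     for status in services_status:
--         runtime_status = status['status']
--         if runtime_status == 'closed':
--             closed_count += 1
--         elif runtime_status == 'running':
--             running_count += 1
--         elif runtime_status == 'starting':
--             starting_count += 1
--         elif runtime_status == 'undeploy':
--             undeploy_count += 1
--
--     service_count = len(services_status)
--     if service_count == 0:
--         group_status = 'closed'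
--     elif closed_count > 0 and closed_count == service_count:
--         group_status = 'closed'
--     elif undeploy_count > 0 and undeploy_count == service_count:
--         group_status = 'undeploy'
--     elif running_count > 0 and running_count == service_count:
--         group_status = 'running'
--     elif starting_count > 0:
--         group_status = 'starting'
--     else:
--         group_status = 'unknow'
--
--     return group_status
-- ===== SOURCE B (Python) =====
-- def compute_group_service_status(services_status):
--     if not services_status:
--         return 'unknow'
--     kinds = {s['status'] for s in services_status}
--     if kinds == {'closed'}:
--         return 'closed'
--     if kinds == {'undeploy'}:
--         return 'undeploy'
--     if kinds == {'running'}: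
--         return 'running'
--     if 'starting' in kinds:
--         return 'starting'
--     return 'unknow'
-- ===== Notes on version B (the rewrite author's own statement) =====
-- stated objective: simpler
-- what changed: Replaces the four status counters and count-vs-length comparisons with a single set of distinct status strings decided by set shape (singleton equality / membership).
import Mathlib
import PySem

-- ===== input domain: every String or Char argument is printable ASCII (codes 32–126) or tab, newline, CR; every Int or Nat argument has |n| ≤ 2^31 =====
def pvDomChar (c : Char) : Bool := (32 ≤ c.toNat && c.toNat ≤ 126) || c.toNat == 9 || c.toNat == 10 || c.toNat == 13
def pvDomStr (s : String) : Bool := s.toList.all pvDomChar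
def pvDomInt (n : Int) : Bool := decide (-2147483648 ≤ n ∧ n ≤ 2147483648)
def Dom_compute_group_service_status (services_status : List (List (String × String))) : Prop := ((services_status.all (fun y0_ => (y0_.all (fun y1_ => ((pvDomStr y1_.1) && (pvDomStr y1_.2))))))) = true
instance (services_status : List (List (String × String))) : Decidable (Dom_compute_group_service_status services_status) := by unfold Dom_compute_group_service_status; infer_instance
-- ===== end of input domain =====

-- B replaces the four counters with a single set of the distinct status strings, decided by set shape (simpler).

-- ===== PORT A =====
-- counters kept as a quadruple (running, closed, starting, undeploy); Dict.getD is exact under Pre_ (key present)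
def pvStepA (c : Nat × Nat × Nat × Nat) (status : List (String × String)) : Nat × Nat × Nat × Nat :=
  let runtime_status := PySem.Dict.getD (PySem.Dict.mk status) "status" ""
  if runtime_status = "closed" then (c.1, c.2.1 + 1, c.2.2.1, c.2.2.2)
  else if runtime_status = "running" then (c.1 + 1, c.2.1, c.2.2.1, c.2.2.2)
  else if runtime_status = "starting" then (c.1, c.2.1, c.2.2.1 + 1, c.2.2.2)
  else if runtime_status = "undeploy" then (c.1, c.2.1, c.2.2.1, c.2.2.2 + 1)
  else c

def compute_group_service_status (services_status : List (List (String × String))) : String :=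
  if services_status = [] then "unknow"
  else
    let c := services_status.foldl pvStepA (0, 0, 0, 0)
    let service_count := services_status.length
    if service_count = 0 then "closed"
    else if 0 < c.2.1 ∧ c.2.1 = service_count then "closed"
    else if 0 < c.2.2.2 ∧ c.2.2.2 = service_count then "undeploy"
    else if 0 < c.1 ∧ c.1 = service_count then "running"
    else if 0 < c.2.2.1 then "starting"
    else "unknow"

-- ===== PORT B =====
def compute_group_service_status_alt (services_status : List (List (String × String))) : String :=
  if services_status = [] then "unknow"
  else
    let kinds : PySem.Set String :=
      PySem.Set.ofList (services_status.map (fun s => PySem.Dict.getD (PySem.Dict.mk s) "status" ""))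
    if PySem.Set.equal kinds ["closed"] then "closed"
    else if PySem.Set.equal kinds ["undeploy"] then "undeploy"
    else if PySem.Set.equal kinds ["running"] then "running"
    else if PySem.Set.contains kinds "starting" then "starting"
    else "unknow"

-- ===== PRECONDITION & SPEC =====
-- Pre_ excludes exactly the inputs where Python A raises KeyError: a service dict without the key "status".
def Pre_compute_group_service_status (services_status : List (List (String × String))) : Prop :=
  ∀ s ∈ services_status, PySem.Dict.contains (PySem.Dict.mk s) "status" = true
instance (services_status : List (List (String × String))) : Decidable (Pre_compute_group_service_status services_status) := by unfold Pre_compute_group_service_status; infer_instance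

def pvWitness_compute_group_service_status : (List (List (String × String))) :=
  [[("status", "running")], [("status", "starting")]]

def Spec_compute_group_service_status (services_status : List (List (String × String))) (out : String) : Prop := out = compute_group_service_status_alt services_status
instance (services_status : List (List (String × String))) (out : String) : Decidable (Spec_compute_group_service_status services_status out) := by unfold Spec_compute_group_service_status; infer_instance

-- ===== CLAIM (what is proved, stated in full; the proofs are below) =====
def Claim_equal_compute_group_service_status : Prop := ∀ (services_status : List (List (String × String))), Dom_compute_group_service_status services_status → Pre_compute_group_service_status services_status → Spec_compute_group_service_status services_status (compute_group_service_status services_status)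

-- ===== LEMMAS AND PROOFS =====

-- the counter fold counts occurrences of each status string
theorem pvFoldA_counts (ss : List (List (String × String))) (c : Nat × Nat × Nat × Nat) :
    ss.foldl pvStepA c =
      (c.1 + (ss.map (fun s => PySem.Dict.getD (PySem.Dict.mk s) "status" "")).count "running",
       c.2.1 + (ss.map (fun s => PySem.Dict.getD (PySem.Dict.mk s) "status" "")).count "closed",
       c.2.2.1 + (ss.map (fun s => PySem.Dict.getD (PySem.Dict.mk s) "status" "")).count "starting",
       c.2.2.2 + (ss.map (fun s => PySem.Dict.getD (PySem.Dict.mk s) "status" "")).count "undeploy") := by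
  induction ss generalizing c with
  | nil => simp
  | cons s ss ih =>
    simp only [List.foldl_cons, List.map_cons, ih, pvStepA, List.count_cons]
    rcases c with ⟨a, b, d, e⟩
    split_ifs with h1 h2 h3 h4 <;>
      simp_all [beq_iff_eq] <;> omega

theorem pvEqual_singleton (l : List String) (k : String) (hne : l ≠ []) :
    PySem.Set.equal (PySem.Set.ofList l) [k] = true ↔ l.count k = l.length := by
  rw [PySem.Set.equal_iff, List.count_eq_length]
  constructor
  · intro h x hx
    have := (h x).mp ((PySem.Set.mem_ofList _ _).mpr hx)
    exact (List.mem_singleton.mp this).symm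
  · intro h x
    simp only [PySem.Set.mem_ofList, List.mem_singleton]
    constructor
    · intro hx; exact (h x hx).symm
    · rintro rfl
      rcases List.exists_mem_of_ne_nil l hne with ⟨y, hy⟩
      rw [h y hy]; exact hy

-- counts of two distinct values never exceed the length together
theorem pvCount_two (l : List String) (a b : String) (hab : a ≠ b) :
    l.count a + l.count b ≤ l.length := by
  induction l with
  | nil => simp
  | cons x xs ih =>
    simp only [List.count_cons, List.length_cons]
    by_cases hxa : x = a <;> by_cases hxb : x = b <;> simp_all <;> omega

-- ===== VERDICT (by name: the statement is the Claim_ definition above) =====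
theorem compute_group_service_status_spec : Claim_equal_compute_group_service_status := by
  intro ss _ _
  unfold Spec_compute_group_service_status compute_group_service_status compute_group_service_status_alt
  by_cases hnil : ss = []
  · simp [hnil]
  · simp only [hnil, if_false]
    rw [pvFoldA_counts]
    set l := ss.map (fun s => PySem.Dict.getD (PySem.Dict.mk s) "status" "") with hl
    have hlne : l ≠ [] := by simp [hl, hnil]
    have hlen : l.length = ss.length := by simp [hl]
    have hlen0 : ss.length ≠ 0 := fun h => hnil (List.length_eq_zero_iff.mp h)
    have hc := pvEqual_singleton l "closed" hlne
    have hu := pvEqual_singleton l "undeploy" hlne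
    have hr := pvEqual_singleton l "running" hlne
    have hmem : PySem.Set.contains (PySem.Set.ofList l) "starting" = true ↔ 0 < l.count "starting" := by
      rw [PySem.Set.contains_iff, PySem.Set.mem_ofList]
      exact List.count_pos_iff.symm
    have h2a := pvCount_two l "closed" "undeploy" (by decide)
    have h2b := pvCount_two l "closed" "running" (by decide)
    have h2c := pvCount_two l "undeploy" "running" (by decide)
    have h2d := pvCount_two l "closed" "starting" (by decide)
    have h2e := pvCount_two l "undeploy" "starting" (by decide)
    have h2f := pvCount_two l "running" "starting" (by decide)
    simp only [Nat.zero_add, hlen0, if_false, hc, hu, hr, hmem, hlen]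
    split_ifs <;> first | rfl | omega
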